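import Asan.CheckWalk
import ProgX.Base.Spec.Runtime
/-
  `__asan_register_globals` (asan_rt.c:165–179; 0x100d60 … 0x100dc0 of the BASE image, 28 instructions, a leaf without a frame)
  PROVED ONCE FOR EVERY PROGRAM: `Asan.registerGlobalsSpec R` for every runtime record `R` whose descriptor table lies in
  `[100000H, C00000H)`. The proof is the one of the unit `__asan_register_globals` of the toy (Toy/Spec/Proved/asan_register_globals.lean,
  itself the accepted stb_vorbis proof), with the table address `T` and the count `n = ds.length` as VARIABLES: the only places that
  used the numbers were the address arithmetic `(i << 6) + table (+ 8, + 16)` (`desc_addr0_g`, `desc_addr_g`: true modulo 2^64, no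
  bound on `i` needed) and the `Lay.Has` side goals of the three loads (`has_ofNat_g`). Self-contained: the pure facts of the unit's
  Lemmas file are repeated here under this file's namespace, so that the file can move to the base (`ProgX/Base/Spec/Proved`) as it is.

      for (i = 0; i < n; i++) {                                   0x100d83  outer loop head (L.….loop2)
        end  = g[i].beg + g[i].size;                              0x100d88  `cutBody_g`: the body, `i < n` known
        stop = g[i].beg + g[i].size_with_redzone;
        a    = (end + 7) & ~7;
        if (end & 7) shadow[end >> 3] = end & 7;                  two paths, merged again at the inner head (`AtFill_g`)
        while (a < stop) { shadow[a >> 3] = 0xF9; a += 8; }       0x100d7a  inner loop head (L.….loop1)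
      }                                                           0x100d7f  `cutNext_g`: `i++` (`AtNext_g`)
-/

open X86 X86.User Asan ProgX ProgX.Base

set_option maxRecDepth 4000
set_option maxHeartbeats 4000000

namespace ProgX.Base.Spec.asan_register_globals_generic

/-! ### Pure facts about the store sequences (`fillMem`, `registerOne`, `registerMem`) and the address arithmetic -/


/-- **One more store at the end of a fill**: `k + 1` stores are `k` stores, then the store at granule `g + k` (the definition
peels the FIRST store off; the loop of the routine adds the LAST one). -/
theorem fillMem_succ_end_g (mem : Mem) (g : Nat) (v : Byte) (k : Nat) :
    fillMem mem g v (k + 1) = (fillMem mem g v k).write (shadowAddr (g + k)) v := by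
  induction k generalizing mem g with
  | zero => rfl
  | succ k ih =>
    show fillMem (mem.write (shadowAddr g) v) (g + 1) v (k + 1) =
      (fillMem (mem.write (shadowAddr g) v) (g + 1) v k).write (shadowAddr (g + (k + 1))) v
    rw [ih]
    have e : g + 1 + k = g + (k + 1) := by omega
    rw [e]

/-- **One more descriptor at the end of the table**: the memory after the first `i + 1` descriptors is `registerOne` of the
memory after the first `i`. -/
theorem registerMem_take_succ_g (mem : Mem) (ds : List GlobalDesc) (i : Nat) (h : i < ds.length) :
    registerMem mem (ds.take (i + 1)) = registerOne (registerMem mem (ds.take i)) ds[i] := by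
  unfold registerMem
  rw [List.take_succ_eq_append_getElem h, List.foldl_append]
  rfl

/-- The stores for one sane descriptor go to the shadow bytes of its slot only. -/
theorem registerOne_sameExcept_g (mem : Mem) (d : GlobalDesc) (hd : d.OK) :
    Mem.SameExcept [shadowSpan d.beg (d.beg + d.sizeRz)] mem (registerOne mem d) := by
  obtain ⟨h1, h2, h3, h4, h5⟩ := hd
  intro a ha
  have ha' := ha (shadowSpan d.beg (d.beg + d.sizeRz)) List.mem_cons_self
  unfold shadowSpan at ha'
  simp only at ha'
  unfold registerOne
  rw [fillMem_read_other _ _ _ _ a (by omega) (by omega)]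
  by_cases he : (d.beg + d.size) % 8 = 0
  · rw [if_pos he]
  · rw [if_neg he]
    apply Mem.read_write_other
    intro e
    have := shadowAddr_toNat ((d.beg + d.size) / 8) (by omega)
    rw [e] at this
    omega

/-- **The footprint of a registration** is what the contract declares: the shadow of every slot (`registerWrites`). -/
theorem registerMem_sameExcept_g (mem : Mem) (ds : List GlobalDesc) (hok : ∀ d, d ∈ ds → d.OK) :
    Mem.SameExcept (registerWrites ds) mem (registerMem mem ds) := by
  induction ds generalizing mem with
  | nil => exact Mem.SameExcept.refl _ _
  | cons d ds ih =>
    have e : registerMem mem (d :: ds) = registerMem (registerOne mem d) ds := rfl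
    rw [e]
    have h1 : Mem.SameExcept (registerWrites (d :: ds)) mem (registerOne mem d) := by
      apply (registerOne_sameExcept_g mem d (hok d List.mem_cons_self)).mono
      intro w hw a ha1 ha2
      refine ⟨w, ?_, ha1, ha2⟩
      rw [List.mem_singleton] at hw
      rw [hw]
      exact List.mem_cons_self
    have h2 : Mem.SameExcept (registerWrites (d :: ds)) (registerOne mem d) (registerMem (registerOne mem d) ds) := by
      apply (ih (registerOne mem d) (fun d' hd' => hok d' (List.mem_cons_of_mem _ hd'))).mono
      intro w hw a ha1 ha2
      exact ⟨w, List.mem_cons_of_mem _ hw, ha1, ha2⟩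
    exact h1.trans h2

/-- A registration leaves everything below the shadow as it was. -/
theorem registerMem_eqOn_low_g (mem : Mem) (ds : List GlobalDesc) (hok : ∀ d, d ∈ ds → d.OK) :
    Mem.EqOn 0 0xC00000 mem (registerMem mem ds) := by
  apply (registerMem_sameExcept_g mem ds hok).eqOn
  intro w hw
  unfold registerWrites at hw
  obtain ⟨d, _, hd⟩ := List.mem_map.mp hw
  rw [← hd]
  unfold shadowSpan
  simp only
  omega

/-- **A load below the shadow reads through a registration** (the return address on the stack, the descriptor table). -/
theorem readLE_registerMem_g (mem : Mem) (ds : List GlobalDesc) (hok : ∀ d, d ∈ ds → d.OK) (a : Word) (k : Nat)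
    (h : a.toNat + k ≤ 0xC00000) : (registerMem mem ds).readLE a k = mem.readLE a k :=
  (registerMem_eqOn_low_g mem ds hok).readLE a k (Nat.zero_le _) h (by omega)

/-- The first descriptors of a sane table are sane. -/
theorem ok_take_g {ds : List GlobalDesc} (hok : ∀ d, d ∈ ds → d.OK) (i : Nat) : ∀ d, d ∈ ds.take i → d.OK :=
  fun d hd => hok d (List.mem_of_mem_take hd)

/-! ### Bit facts of the address arithmetic -/

/-- Clearing the low three bits is `>>> 3` then `<<< 3` (a closed bit-vector fact). -/
theorem bv_and_neg8_g (x : BitVec 64) : x &&& 18446744073709551608#64 = (x >>> 3) <<< 3 := by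
  bv_decide

/-- `and rax, -8` rounds down to a multiple of 8. -/
theorem toNat_and_neg8_g (x : Word) : (x &&& 18446744073709551608).toNat = x.toNat / 8 * 8 := by
  have h := congrArg BitVec.toNat (bv_and_neg8_g x.toBitVec)
  rw [BitVec.toNat_shiftLeft, BitVec.toNat_ushiftRight, Nat.shiftLeft_eq, Nat.shiftRight_eq_div_pow] at h
  have hlt := x.toNat_lt
  show (x.toBitVec &&& 18446744073709551608#64).toNat = _
  rw [h]
  show x.toNat / 2 ^ 3 * 2 ^ 3 % 2 ^ 64 = _
  omega

/-- `test dl, 7`: the low three bits of the low byte are the number modulo 8. -/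
theorem test7_toNat_g (x : Word) : (Word.part Width.w8 x &&& 7#8).toNat = x.toNat % 8 := by
  unfold Word.part
  simp only [Width.bits, BitVec.toNat_and, BitVec.toNat_setWidth, UInt64.toNat_toBitVec]
  show x.toNat % 2 ^ 8 &&& 2 ^ 3 - 1 = _
  rw [Nat.and_two_pow_sub_one_eq_mod]
  omega

/-- `and edx, 7 ; mov [..], dl`: the byte stored is the number modulo 8. -/
theorem and7_byte_g (x : Word) : (BitVec.setWidth 8 (Word.part Width.w32 x &&& 7#32)).toNat = x.toNat % 8 := by
  unfold Word.part
  simp only [Width.bits, BitVec.toNat_and, BitVec.toNat_setWidth, UInt64.toNat_toBitVec]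
  show (x.toNat % 2 ^ 32 &&& 2 ^ 3 - 1) % 2 ^ 8 = _
  rw [Nat.and_two_pow_sub_one_eq_mod]
  omega

/-- `shl rax, 6` on the number `i`: `64 * i` (modulo 2^64 on both sides: no bound on `i` is needed). -/
theorem shl6_ofNat_g (i : Nat) : UInt64.ofNat i <<< 6 = UInt64.ofNat (64 * i) := by
  apply UInt64.toNat_inj.mp
  rw [UInt64.toNat_shiftLeft, UInt64.toNat_ofNat', UInt64.toNat_ofNat', Nat.shiftLeft_eq]
  have e6 : UInt64.toNat 6 % 64 = 6 := by decide
  rw [e6]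
  omega

/-- The address of the first word of descriptor `i` of the table at `T`, as the code computes it (`shl 6`, `add rax, rdi`). -/
theorem desc_addr0_g (T i : Nat) : UInt64.ofNat i <<< 6 + UInt64.ofNat T = UInt64.ofNat (T + 64 * i) := by
  have e : T + 64 * i = 64 * i + T := by omega
  rw [shl6_ofNat_g, e]
  exact (UInt64.ofNat_add _ _).symm

/-- The address of the word at offset `k` (8: `size`, 16: `size_with_redzone`) of descriptor `i` of the table at `T`. -/
theorem desc_addr_g (T i k : Nat) :
    UInt64.ofNat i <<< 6 + UInt64.ofNat T + UInt64.ofNat k = UInt64.ofNat (T + 64 * i + k) := by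
  rw [desc_addr0_g]
  exact (UInt64.ofNat_add _ _).symm

/-- A word of the table lies in the user region: the table is at or above 100000H and ends below the layout's end. -/
theorem has_ofNat_g {Lay : Layout} (hLay : Lay.hi = 0x1000000) (x : Nat) (h1 : 0x100000 ≤ x) (h2 : x + 8 ≤ 0x1000000) :
    Lay.Has (UInt64.ofNat x) 8 := by
  unfold Layout.Has Layout.lo
  rw [UInt64.toNat_ofNat', hLay]
  omega

/-- `lea rax, [rdx + 7] ; and rax, -8` on the number `e`: `e` rounded up to a multiple of 8. -/
theorem round8_ofNat_g (e : Nat) (h : e + 7 < 2 ^ 64) :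
    (UInt64.ofNat e + 7) &&& 18446744073709551608 = UInt64.ofNat ((e + 7) / 8 * 8) := by
  apply UInt64.toNat_inj.mp
  rw [toNat_and_neg8_g]
  have e1 : (UInt64.ofNat e + 7).toNat = e + 7 := by
    rw [show (7 : UInt64) = UInt64.ofNat 7 from rfl, ← UInt64.ofNat_add, UInt64.toNat_ofNat', Nat.mod_eq_of_lt h]
  rw [e1, UInt64.toNat_ofNat']
  omega

/-- `test dl, 7` on the number `e`. -/
theorem test7_ofNat_g (e : Nat) (h : e < 2 ^ 64) : (Word.part Width.w8 (UInt64.ofNat e) &&& 7#8).toNat = e % 8 := by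
  rw [test7_toNat_g, UInt64.toNat_ofNat', Nat.mod_eq_of_lt h]

/-- The byte `and edx, 7` leaves of the number `e`. -/
theorem and7_ofNat_g (e : Nat) (h : e < 2 ^ 64) :
    (BitVec.setWidth 8 (Word.part Width.w32 (UInt64.ofNat e) &&& 7#32)).toNat = e % 8 := by
  rw [and7_byte_g, UInt64.toNat_ofNat', Nat.mod_eq_of_lt h]

/-- **A one-byte store through `shr 3 ; + C00000H`** is the store to the shadow byte of the address's granule, in the
vocabulary of `fillMem` / `registerOne` (`Mem.write` at `shadowAddr`). -/
theorem store_shadow_byte_g (m : Mem) (x v : Nat) (hx : x < 0x1000000) (hv : v < 256) :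
    m.writeLE (UInt64.ofNat x >>> 3 + 12582912) 1 v = m.write (shadowAddr (x / 8)) (UInt8.ofNat v) := by
  have ea : UInt64.ofNat x >>> 3 + 12582912 = shadowAddr (x / 8) := by
    apply eq_shadowAddr
    have e3 : (UInt64.ofNat x >>> 3).toNat = x / 8 := by
      rw [Asan.toNat_shr3, UInt64.toNat_ofNat']
      omega
    have ec : (12582912 : UInt64) = UInt64.ofNat 12582912 := rfl
    rw [ec, toNat_add_ofNat _ _ (by omega), e3]
    omega
  rw [Mem.writeLE_one, Nat.mod_eq_of_lt hv, ea]

/-! ### The walk -/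

/-- 0x100d88 (asan_rt.c:168): the first instruction of the `for` body, after `cmp r8, rsi ; jae` has established `i < n`. -/
abbrev cutBody_g : Word := 0x100d88

/-- 0x100d7f (asan_rt.c:167): `add r8, 1`, where the inner `while` loop exits to. -/
abbrev cutNext_g : Word := 0x100d7f

/-- **At the inner loop head for descriptor `d`** (0x100d7a, first arrival): `rax = a`, the end of the global rounded up to a
granule; `rcx = stop`, the end of the slot; `r8 = i`; the memory is `m`, the memory at the start of this round of the outer
loop, with the partial granule's value stored if the global does not end on a granule — the first argument of `fillMem` in
`registerOne`. Both paths of `if ((end & 7) != 0)` arrive in this description. `u` is the routine's entry state. -/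
structure AtFill_g (u₀ u : State) (i : Nat) (d : GlobalDesc) (m : Mem) (v : State) : Prop where
  rip : v.rip = ProgX.Base.L.__asan_register_globals.loop1
  rax : v.reg .rax = UInt64.ofNat ((d.beg + d.size + 7) / 8 * 8)
  rcx : v.reg .rcx = UInt64.ofNat (d.beg + d.sizeRz)
  r8 : v.reg .r8 = UInt64.ofNat i
  kept : RegsKept [.rax, .rcx, .rdx, .r8, .r9] u v
  mem : v.mem = if (d.beg + d.size) % 8 = 0 then m
    else m.write (shadowAddr ((d.beg + d.size) / 8)) (UInt8.ofNat ((d.beg + d.size) % 8))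
  code : Mem.EqOn ProgX.Base.L.textLo ProgX.Base.L.textHi u₀.mem v.mem
  df : v.flags .df = false
  mxcsr : v.mxcsr = u.mxcsr
  zmm : v.zmm = u.zmm

/-- **After the inner loop for descriptor `d`** (0x100d7f): the memory is `registerOne m d`; `r8 = i` still. -/
structure AtNext_g (u₀ u : State) (i : Nat) (d : GlobalDesc) (m : Mem) (v : State) : Prop where
  rip : v.rip = cutNext_g
  r8 : v.reg .r8 = UInt64.ofNat i
  kept : RegsKept [.rax, .rcx, .rdx, .r8, .r9] u v
  mem : registerOne m d = v.mem
  code : Mem.EqOn ProgX.Base.L.textLo ProgX.Base.L.textHi u₀.mem v.mem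
  df : v.flags .df = false
  mxcsr : v.mxcsr = u.mxcsr
  zmm : v.zmm = u.zmm

/-- **0x100d88 … 0x100d7a** (asan_rt.c:168–172): the three words of descriptor `i` of the table at `T` are loaded (`r1 r2 r3`: what the table holds; `h1 h2 h3`: they lie in the user region),
`end`, `stop` and `a` computed, and if `end` is not on a granule the partial value `end & 7` is stored at the shadow byte of
its granule. Both paths end at the inner loop head in `AtFill_g`. -/
theorem to_fill_g {Lay : Layout} (hLay : Lay.hi = 0x1000000) {μ : Microarch} (hμ : UserX.MicroOK μ) {u₀ : State}
    (hcode : HasCodeNat Lay u₀ ProgX.Base.L.__asan_register_globals.entry ProgX.Base.Code.code___asan_register_globals.nat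
      ProgX.Base.L.__asan_register_globals.size)
    (u s : State) (i : Nat) (d : GlobalDesc) (T : Nat) (hd : d.OK) (hrdi : u.reg .rdi = UInt64.ofNat T)
    (w_rip : s.rip = cutBody_g) (w_r8 : s.reg .r8 = UInt64.ofNat i) (w_kept : RegsKept [.rax, .rcx, .rdx, .r8, .r9] u s)
    (w_eq : Mem.EqOn ProgX.Base.L.textLo ProgX.Base.L.textHi u₀.mem s.mem) (hdf : s.flags .df = false)
    (w_mxcsr : s.mxcsr = u.mxcsr) (w_zmm : s.zmm = u.zmm)
    (h1 : Lay.Has (UInt64.ofNat i <<< 6 + UInt64.ofNat T) 8)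
    (h2 : Lay.Has (UInt64.ofNat i <<< 6 + UInt64.ofNat T + 8) 8)
    (h3 : Lay.Has (UInt64.ofNat i <<< 6 + UInt64.ofNat T + 16) 8)
    (r1 : s.mem.readLE (UInt64.ofNat i <<< 6 + UInt64.ofNat T) 8 = d.beg)
    (r2 : s.mem.readLE (UInt64.ofNat i <<< 6 + UInt64.ofNat T + 8) 8 = d.size)
    (r3 : s.mem.readLE (UInt64.ofNat i <<< 6 + UInt64.ofNat T + 16) 8 = d.sizeRz) :
    ReachVia Lay μ ProgX.Base.WayInv s (AtFill_g u₀ u i d s.mem) := by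
  obtain ⟨hd1, hd2, hd3, hd4, hd5⟩ := hd
  u_walk hcode [hμ.vendor] until [ProgX.Base.L.__asan_register_globals.loop1] span [ProgX.Base.L.textLo, ProgX.Base.L.textHi] side (v_side)
  · -- `je 100d7a` taken (asan_rt.c:171): the global ends on a granule, nothing stored
    rw [← UInt64.ofNat_add] at w_rax w_rcx hbr_100dab
    rw [test7_ofNat_g _ (by omega)] at hbr_100dab
    rw [round8_ofNat_g _ (by omega)] at w_rax
    refine ReachVia.done ⟨w_rip, w_rax, w_rcx, w_r8, w_kept, ?_, w_eq, ?_, w_mxcsr, w_zmm⟩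
    · rw [if_pos hbr_100dab]
      exact w_mem
    · rw [w_flags]
      simp only [X86.User.df_setStatus]
      exact hdf
  · -- 0x100dad … 0x100dbe (asan_rt.c:172): the partial granule gets `end & 7`
    rw [← UInt64.ofNat_add] at w_rax w_rcx hbr_100dab w_mem
    rw [test7_ofNat_g _ (by omega)] at hbr_100dab
    rw [round8_ofNat_g _ (by omega)] at w_rax
    rw [and7_ofNat_g _ (by omega), store_shadow_byte_g _ _ _ (by omega) (by omega)] at w_mem
    refine ReachVia.done ⟨w_rip, w_rax, w_rcx, w_r8, w_kept, ?_, w_eq, ?_, w_mxcsr, w_zmm⟩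
    · rw [if_neg hbr_100dab]
      exact w_mem
    · rw [w_flags]
      simp only [X86.User.df_setStatus]
      exact hdf

/-- **The inner loop, 0x100d7a … 0x100d7f** (asan_rt.c:174–177 `while (a < stop)`): invariant `rax = a + 8 k ≤ stop` and the memory
is `fillMem m1 (a / 8) F9H k`; measure `stop - rax`. At the exit `a + 8 k = stop`, and the fill is the one of `registerOne`. -/
theorem fill_loop_g {Lay : Layout} (hLay : Lay.hi = 0x1000000) {μ : Microarch} (hμ : UserX.MicroOK μ) {u₀ : State}
    (hcode : HasCodeNat Lay u₀ ProgX.Base.L.__asan_register_globals.entry ProgX.Base.Code.code___asan_register_globals.nat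
      ProgX.Base.L.__asan_register_globals.size)
    (u : State) (i : Nat) (d : GlobalDesc) (hd : d.OK) (m : Mem) (v : State) (hv : AtFill_g u₀ u i d m v) :
    ReachVia Lay μ ProgX.Base.WayInv v (AtNext_g u₀ u i d m) := by
  obtain ⟨hd1, hd2, hd3, hd4, hd5⟩ := hd
  obtain ⟨w_rip, w_rax, w_rcx, w_r8, w_kept, hm1, w_eq, hdf, w_mxcsr, w_zmm⟩ := hv
  -- the memory the fill starts from: `registerOne`'s first argument of `fillMem`
  generalize hm1def : (if (d.beg + d.size) % 8 = 0 then m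
    else m.write (shadowAddr ((d.beg + d.size) / 8)) (UInt8.ofNat ((d.beg + d.size) % 8))) = m1 at hm1
  -- the loop head: what varies is generalised (`k` rounds done)
  obtain ⟨k, hk, hkle, hfill⟩ : ∃ k : Nat, v.reg .rax = UInt64.ofNat ((d.beg + d.size + 7) / 8 * 8 + 8 * k) ∧
      (d.beg + d.size + 7) / 8 * 8 + 8 * k ≤ d.beg + d.sizeRz ∧
      fillMem m1 ((d.beg + d.size + 7) / 8) 0xF9 k = v.mem :=
    ⟨0, w_rax, by omega, hm1.symm⟩
  clear hm1 w_rax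
  u_loop [k] (fun v' => d.beg + d.sizeRz - (v'.reg .rax).toNat) (AtNext_g u₀ u i d m)
  · u_walk hcode [hμ.vendor] until [ProgX.Base.L.__asan_register_globals.loop1, cutNext_g] span [ProgX.Base.L.textLo, ProgX.Base.L.textHi] side (v_side)
    · -- 0x100d68 … 0x100d76 (asan_rt.c:175–176), the back edge: one more F9H, `a = a + 8`
      have hlt : (d.beg + d.size + 7) / 8 * 8 + 8 * k < d.beg + d.sizeRz := by
        rw [UInt64.toNat_ofNat', UInt64.toNat_ofNat'] at hbr_100d7d
        omega
      u_loop_back [k + 1]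
      · -- the direction flag: `add` writes status flags only
        rw [w_flags]
        simp only [X86.User.df_setStatus]
        exact hdf
      · -- a = a + 8
        have e : (d.beg + d.size + 7) / 8 * 8 + 8 * (k + 1) = (d.beg + d.size + 7) / 8 * 8 + 8 * k + 8 := by omega
        rw [w_rax, e]
        exact (UInt64.ofNat_add _ _).symm
      · -- still a ≤ stop: both are multiples of 8
        omega
      · -- one more F9H at the end of the fill
        have e : ((d.beg + d.size + 7) / 8 * 8 + 8 * k) / 8 = (d.beg + d.size + 7) / 8 + k := by omega
        rw [w_mem, ← hfill, fillMem_succ_end_g, store_shadow_byte_g _ _ _ (by omega) (by omega), e]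
        rfl
      · -- the measure: stop - a
        rw [w_rax]
        u_omega
    · -- `jb` not taken: a = stop, the fill is complete
      u_loop_exit
      have hk' : (d.beg + d.sizeRz) / 8 - (d.beg + d.size + 7) / 8 = k := by
        rw [UInt64.toNat_ofNat', UInt64.toNat_ofNat'] at hbr_100d7d
        omega
      refine ⟨w_rip, w_r8, w_kept, ?_, w_eq, ?_, w_mxcsr, w_zmm⟩
      · rw [w_mem, ← hfill]
        unfold registerOne
        rw [hm1def, hk']
      · rw [w_flags]
        simp only [X86.User.df_setStatus]
        exact hdf
  · -- the loop's postcondition is the lemma's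
    exact ReachVia.done u_post

end ProgX.Base.Spec.asan_register_globals_generic

/-- **`__asan_register_globals(table, n)` satisfies `registerGlobalsSpec R` FOR EVERY RUNTIME RECORD `R`** whose descriptor table
lies in the user region below the shadow: `100000H ≤ R.table` (the loads of the descriptors need `Lay.Has`) and
`R.table + 64 * R.descs.length ≤ C00000H` (a registration writes shadow bytes only, so the table and the return address are read
through the stores made so far). Nothing is asked of `R.sym`, and nothing of the count but what the pre says (`rsi = R.descs.length`).
The outer loop (`u_loop` at 0x100d83, invariant: the memory is `registerMem u.mem (ds.take i)`, measure `n - i`), whose body is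
`to_fill_g`, `fill_loop_g` and `add r8, 1`; at the exit `i = n`, the memory is `registerMem u.mem ds`, and the routine returns. -/
theorem ProgX.Base.Spec.Proved.asan_register_globals_generic_ok :
    ∀ (Lay : Layout) (_hLay : Lay.hi = 0x1000000) (μ : Microarch) (_hμ : UserX.MicroOK μ) (u₀ : State)
      (_hcode : HasCodeNat Lay u₀ ProgX.Base.L.__asan_register_globals.entry ProgX.Base.Code.code___asan_register_globals.nat
        ProgX.Base.L.__asan_register_globals.size)
      (R : Asan.Runtime) (_htabLo : 0x100000 ≤ R.table) (_htabHi : R.table + 64 * R.descs.length ≤ 0xC00000),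
      Calls Lay μ ProgX.Base.WayInv (ProgX.Base.conv u₀) ProgX.Base.L.__asan_register_globals.entry
        (Asan.registerGlobalsSpec R) := by
  intro Lay hLay μ hμ u₀ hcode R htabLo htabHi u ret he hpre
  v_entry he
  obtain ⟨hrdi, hrsi, hdescs, hok⟩ := hpre
  -- the table and the descriptors stay abstract: `T`, `ds`
  generalize hT : R.table = T at *
  generalize hds : R.descs = ds at *
  have hrdi' : u.reg .rdi = UInt64.ofNat T := by
    apply UInt64.toNat_inj.mp
    rw [hrdi, UInt64.toNat_ofNat']
    omega
  have hsp8 : (u.reg .rsp).toNat + 8 ≤ 0xC00000 := by omega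
  -- (a fact about the vector registers, so that the walk tracks them: `Keeps` asks for them)
  have hzmm : u.zmm = u.zmm := rfl
  -- 0x100d60 … 0x100d83 (asan_rt.c:167): i = 0
  u_walk hcode [hμ.vendor] until [ProgX.Base.L.__asan_register_globals.loop2] span [ProgX.Base.L.textLo, ProgX.Base.L.textHi] side (v_side)
  -- the outer loop head: `i` descriptors registered. (The memory equation is written right to left, so that the walk
  -- keeps the loop head's memory as its base and does not rewrite with it.)
  obtain ⟨i, hi, hile, hmem⟩ : ∃ i : Nat, s_100d66.reg .r8 = UInt64.ofNat i ∧ i ≤ ds.length ∧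
      registerMem u.mem (ds.take i) = s_100d66.mem :=
    ⟨0, w_r8, Nat.zero_le _, w_mem.symm⟩
  have hdf : s_100d66.flags .df = false := by
    rw [w_flags]
    exact he_df
  replace w_kept := w_kept.mono_all (S' := [.rax, .rcx, .rdx, .r8, .r9]) (by rfl)
  clear w_mem w_flags w_r8
  u_loop [i] (fun v => ds.length - (v.reg .r8).toNat)
  -- the return address is still on the stack: a registration writes shadow bytes only
  have hs0 : UInt64.ofNat (s_100d66.mem.readLE (u.reg .rsp) 8) = ret := by
    rw [← hmem, ProgX.Base.Spec.asan_register_globals_generic.readLE_registerMem_g _ _ (ProgX.Base.Spec.asan_register_globals_generic.ok_take_g hok i) _ _ hsp8]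
    exact he_retAddr
  u_walk hcode [hμ.vendor] until [ProgX.Base.Spec.asan_register_globals_generic.cutBody_g] span [ProgX.Base.L.textLo, ProgX.Base.L.textHi] side (v_side)
  · -- `jae 100dc0` taken, 0x100dc0 `ret` (asan_rt.c:179): i = n, the whole table is registered
    refine ReachVia.done (Or.inl ?_)
    have hin : i = ds.length := by
      rw [UInt64.toNat_ofNat'] at hbr_100d86
      omega
    have hall : s_100dc0.mem = registerMem u.mem ds := by
      rw [w_mem, ← hmem, hin, List.take_of_length_le (Nat.le_refl _)]
    v_returned
    · -- the post: the memory is that of the whole table; rax rcx rdx r8 r9 rsp are the only registers written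
      show s_100dc0.mem = registerMem u.mem R.descs ∧ Keeps clobRegister u s_100dc0
      rw [hds]
      exact ⟨hall, w_kept.mono_all (by rfl), w_zmm, w_mxcsr⟩
    · -- the footprint: the shadow of the slots
      rw [hall]
      apply (ProgX.Base.Spec.asan_register_globals_generic.registerMem_sameExcept_g u.mem ds hok).mono
      intro w hw a ha1 ha2
      refine ⟨w, ?_, ha1, ha2⟩
      show w ∈ _ :: registerWrites R.descs
      rw [hds]
      exact List.mem_cons_of_mem _ hw
  · -- 0x100d88 (asan_rt.c:168): the body of the `for`, i < n; descriptor `d = ds[i]`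
    have hilen : i < ds.length := by
      rw [UInt64.toNat_ofNat'] at hbr_100d86
      omega
    have hd : ds[i].OK := hok ds[i] (List.getElem_mem hilen)
    -- the addresses of the three words of the descriptor, as the code computes them and as numbers
    have e1 : UInt64.ofNat i <<< 6 + UInt64.ofNat T = UInt64.ofNat (T + 64 * i) := ProgX.Base.Spec.asan_register_globals_generic.desc_addr0_g T i
    have e2 : UInt64.ofNat i <<< 6 + UInt64.ofNat T + 8 = UInt64.ofNat (T + 64 * i + 8) := ProgX.Base.Spec.asan_register_globals_generic.desc_addr_g T i 8
    have e3 : UInt64.ofNat i <<< 6 + UInt64.ofNat T + 16 = UInt64.ofNat (T + 64 * i + 16) := ProgX.Base.Spec.asan_register_globals_generic.desc_addr_g T i 16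
    -- the three words of the descriptor, read from the memory of this round: the table is below the shadow
    obtain ⟨hr1, hr2, hr3⟩ := hdescs i hilen
    have r1 : s_100d86.mem.readLE (UInt64.ofNat i <<< 6 + UInt64.ofNat T) 8 = ds[i].beg := by
      rw [e1, w_mem, ← hmem, ProgX.Base.Spec.asan_register_globals_generic.readLE_registerMem_g _ _ (ProgX.Base.Spec.asan_register_globals_generic.ok_take_g hok i) _ _ (by rw [UInt64.toNat_ofNat']; omega)]
      exact hr1
    have r2 : s_100d86.mem.readLE (UInt64.ofNat i <<< 6 + UInt64.ofNat T + 8) 8 = ds[i].size := by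
      rw [e2, w_mem, ← hmem, ProgX.Base.Spec.asan_register_globals_generic.readLE_registerMem_g _ _ (ProgX.Base.Spec.asan_register_globals_generic.ok_take_g hok i) _ _ (by rw [UInt64.toNat_ofNat']; omega)]
      exact hr2
    have r3 : s_100d86.mem.readLE (UInt64.ofNat i <<< 6 + UInt64.ofNat T + 16) 8 = ds[i].sizeRz := by
      rw [e3, w_mem, ← hmem, ProgX.Base.Spec.asan_register_globals_generic.readLE_registerMem_g _ _ (ProgX.Base.Spec.asan_register_globals_generic.ok_take_g hok i) _ _ (by rw [UInt64.toNat_ofNat']; omega)]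
      exact hr3
    -- … and they lie in the user region
    have h1 : Lay.Has (UInt64.ofNat i <<< 6 + UInt64.ofNat T) 8 := by
      rw [e1]
      exact ProgX.Base.Spec.asan_register_globals_generic.has_ofNat_g hLay _ (by omega) (by omega)
    have h2 : Lay.Has (UInt64.ofNat i <<< 6 + UInt64.ofNat T + 8) 8 := by
      rw [e2]
      exact ProgX.Base.Spec.asan_register_globals_generic.has_ofNat_g hLay _ (by omega) (by omega)
    have h3 : Lay.Has (UInt64.ofNat i <<< 6 + UInt64.ofNat T + 16) 8 := by
      rw [e3]
      exact ProgX.Base.Spec.asan_register_globals_generic.has_ofNat_g hLay _ (by omega) (by omega)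
    have hdf1 : s_100d86.flags .df = false := by
      rw [w_flags]
      simp only [X86.User.df_setStatus]
      exact hdf
    -- 0x100d88 … 0x100d7a, then the inner loop to 0x100d7f
    refine (ProgX.Base.Spec.asan_register_globals_generic.to_fill_g hLay hμ hcode u s_100d86 i ds[i] T hd hrdi' w_rip w_r8 w_kept w_eq hdf1 w_mxcsr w_zmm
      h1 h2 h3 r1 r2 r3).trans ?_
    intro v1 hv1
    refine (ProgX.Base.Spec.asan_register_globals_generic.fill_loop_g hLay hμ hcode u i ds[i] hd s_100d86.mem v1 hv1).trans ?_
    intro v2 hv2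
    clear hv1 v1 r1 r2 r3 h1 h2 h3 e1 e2 e3 hdf1 hr1 hr2 hr3
    obtain ⟨h_rip, h_r8, h_kept, hm2, h_eq, hdf2, h_mxcsr, h_zmm⟩ := hv2
    rw [w_mem] at hm2
    clear w_rip w_r8 w_kept w_mem w_eq w_flags w_mxcsr w_zmm s_100d86
    -- 0x100d7f (asan_rt.c:167): i++, back at the outer loop head
    u_walk hcode [hμ.vendor] until [ProgX.Base.L.__asan_register_globals.loop2] span [ProgX.Base.L.textLo, ProgX.Base.L.textHi] side (v_side)
    u_loop_back [i + 1]
    · -- i = i + 1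
      rw [w_r8]
      exact (UInt64.ofNat_add _ _).symm
    · omega
    · -- one more descriptor registered
      rw [w_mem, ← hm2, ProgX.Base.Spec.asan_register_globals_generic.registerMem_take_succ_g _ _ _ hilen, hmem]
    · -- the direction flag: `add` writes status flags only
      rw [w_flags]
      simp only [X86.User.df_setStatus]
      exact hdf2
    · -- the measure: n - i
      rw [w_r8]
      u_omega
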